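-- pv_equiv track=rewrite | github.com/ppigazzini/r47_android | scripts/r47_contracts/derive_key_font_policy.py | _compress_codepoint_ranges
-- ===== SOURCE A (Python) =====
-- def _compress_codepoint_ranges(codepoints: list[int]) -> list[list[int]]:
--     if not codepoints:
--         return []
--
--     ranges: list[list[int]] = []
--     start = codepoints[0]
--     end = start
--     for codepoint in codepoints[1:]:
--         if codepoint == end + 1:
--             end = codepoint
--             continue
--
--         ranges.append([start, end])
--         start = codepoint
--         end = codepoint
--
--     ranges.append([start, end])
--     return ranges
-- ===== SOURCE B (Python) =====
-- def _compress_codepoint_ranges(codepoints: list[int]) -> list[list[int]]: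
--     # Run detection via the derived key codepoint - index: positions sharing
--     # one key form a contiguous run; scan forward to the run's end and emit
--     # [first, last] per run, jumping from run to run.
--     ranges: list[list[int]] = []
--     n = len(codepoints)
--     i = 0
--     while i < n:
--         key = codepoints[i] - i
--         j = i + 1
--         while j < n and codepoints[j] - j == key:
--             j += 1
--         ranges.append([codepoints[i], codepoints[j - 1]])
--         i = j
--     return ranges
-- ===== Notes on version B (the rewrite author's own statement) =====
-- stated objective: alternative
-- what changed: Replaces A's per-element start/end state machine with run detection via the derived key codepoint-index: an inner scan finds each contiguous run's end and one [first,last] pair is emitted per run.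
import Mathlib
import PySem

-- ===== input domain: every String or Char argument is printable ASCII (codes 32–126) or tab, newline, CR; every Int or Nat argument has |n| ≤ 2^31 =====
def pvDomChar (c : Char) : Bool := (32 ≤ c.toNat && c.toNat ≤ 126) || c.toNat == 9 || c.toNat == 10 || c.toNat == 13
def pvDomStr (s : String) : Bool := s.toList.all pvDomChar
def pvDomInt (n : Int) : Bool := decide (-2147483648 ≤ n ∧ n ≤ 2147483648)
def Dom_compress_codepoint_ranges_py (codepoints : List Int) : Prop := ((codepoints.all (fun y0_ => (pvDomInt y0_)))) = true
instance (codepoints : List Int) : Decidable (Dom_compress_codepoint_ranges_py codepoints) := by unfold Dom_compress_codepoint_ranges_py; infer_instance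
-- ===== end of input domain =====

-- B replaces A's per-element start/end state machine by run detection via the
-- derived key codepoint - index (one [first,last] pair emitted per run); same
-- O(n) cost, different decomposition.

-- ===== PORT A =====
-- the for-loop over codepoints[1:], carrying (ranges, start, end)
def pvLoopA (ranges : List (List Int)) (start end_ : Int) : List Int → List (List Int)
  | [] => ranges ++ [[start, end_]]
  | c :: cs =>
    if c = end_ + 1 then pvLoopA ranges start c cs
    else pvLoopA (ranges ++ [[start, end_]]) c c cs

def compress_codepoint_ranges_py (codepoints : List Int) : List (List Int) :=
  match codepoints with
  | [] => []
  | c :: cs => pvLoopA [] c c cs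

-- ===== PORT B =====
-- Source B indexes the list with i/j; the port transcribes that as recursion on the
-- suffix starting at the running index, which carries the same values.

-- inner while loop: consume the elements v (at running index i) with v - i = key;
-- returns (run continuation, remaining suffix)
def pvTakeRun (key i : Int) : List Int → List Int × List Int
  | [] => ([], [])
  | v :: vs =>
    if v - i = key then
      let p := pvTakeRun key (i + 1) vs
      (v :: p.1, p.2)
    else ([], v :: vs)

theorem pvTakeRun_snd_length (key i : Int) (xs : List Int) :
    (pvTakeRun key i xs).2.length ≤ xs.length := by
  induction xs generalizing i with
  | nil => simp [pvTakeRun]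
  | cons v vs ih =>
    simp only [pvTakeRun]
    split
    · exact le_trans (ih (i + 1)) (Nat.le_succ _)
    · simp

-- codepoints[j-1]: the last element of the nonempty run v :: g
def pvLastOf (v : Int) : List Int → Int
  | [] => v
  | x :: xs => pvLastOf x xs

-- outer while loop: i is the running index of the head of the suffix
def pvGoB (i : Int) : List Int → List (List Int)
  | [] => []
  | v :: vs =>
    let p := pvTakeRun (v - i) (i + 1) vs
    [v, pvLastOf v p.1] :: pvGoB (i + 1 + p.1.length) p.2
termination_by xs => xs.length
decreasing_by
  exact Nat.lt_succ_of_le (pvTakeRun_snd_length _ _ _)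

def compress_codepoint_ranges_py_alt (codepoints : List Int) : List (List Int) :=
  pvGoB 0 codepoints

-- ===== PRECONDITION & SPEC =====
def Spec_compress_codepoint_ranges_py (codepoints : List Int) (out : List (List Int)) : Prop := out = compress_codepoint_ranges_py_alt codepoints
instance (codepoints : List Int) (out : List (List Int)) : Decidable (Spec_compress_codepoint_ranges_py codepoints out) := by unfold Spec_compress_codepoint_ranges_py; infer_instance

-- ===== CLAIM (what is proved, stated in full; the proofs are below) =====
def Claim_equal_compress_codepoint_ranges_py : Prop := ∀ (codepoints : List Int), Dom_compress_codepoint_ranges_py codepoints → Spec_compress_codepoint_ranges_py codepoints (compress_codepoint_ranges_py codepoints)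

-- ===== LEMMAS AND PROOFS =====

-- A's loop, started with current range (start=s, end=e) and the run index of e
-- being i, produces the accumulator followed by B's remaining output.
theorem pvLoopA_eq (xs : List Int) :
    ∀ (e s i : Int) (acc : List (List Int)),
      pvLoopA acc s e xs =
        acc ++ ([s, pvLastOf e (pvTakeRun (e - i) (i + 1) xs).1] ::
          pvGoB (i + 1 + (pvTakeRun (e - i) (i + 1) xs).1.length)
            (pvTakeRun (e - i) (i + 1) xs).2) := by
  induction xs with
  | nil => intro e s i acc; simp [pvLoopA, pvTakeRun, pvGoB, pvLastOf]
  | cons v vs ih =>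
    intro e s i acc
    by_cases h : v = e + 1
    · have hc : v - (i + 1) = e - i := by omega
      have hk : e - i = v - (i + 1) := by omega
      simp only [pvLoopA, pvTakeRun, hc, if_pos h]
      rw [ih v s (i + 1) acc]
      simp only [hk]
      congr 3
      push_cast [List.length_cons]
      omega
    · have hc : ¬ v - (i + 1) = e - i := by omega
      simp only [pvLoopA, pvTakeRun, if_neg h, if_neg hc]
      rw [ih v v (i + 1) (acc ++ [[s, e]])]
      simp only [pvLastOf, List.append_assoc, List.cons_append, List.nil_append]
      congr 2
      rw [pvGoB]
      simp only [List.length_nil, Nat.cast_zero, add_zero]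

-- ===== VERDICT (by name: the statement is the Claim_ definition above) =====
theorem compress_codepoint_ranges_py_spec : Claim_equal_compress_codepoint_ranges_py := by
  intro codepoints _
  unfold Spec_compress_codepoint_ranges_py
  cases codepoints with
  | nil => simp [compress_codepoint_ranges_py, compress_codepoint_ranges_py_alt, pvGoB]
  | cons c cs =>
    show pvLoopA [] c c cs = pvGoB 0 (c :: cs)
    rw [pvLoopA_eq cs c c 0 [], pvGoB]
    norm_num
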